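-- pv_equiv track=rewrite | github.com/MadSons/ECE-20875-Data-Science--homework-2 | homework2.py | happybirthday
-- ===== SOURCE A (Python) =====
-- def happybirthday(name_to_day, name_to_month, name_to_year):
--     # name_to_day, name_to_month and name_to_year are dictionaries
--     # Write your code here
--     date_to_all = {}
--     for name in name_to_day:
--         day = name_to_day[name]
--         month = name_to_month[name]
--         year = name_to_year[name]
--         age = 2022 - year
--         info = (month, year, age)
--         if day in date_to_all:
--             old_info = date_to_all[day][1]
--             old_age = old_info[2]
--             if age > old_age:
--                 date_to_all[day] = (name, info)
--         else:
--             date_to_all[day] = (name, info)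
--     return date_to_all
--     # return the variable storing date_to_all
--     # Output should be a dictionary
--     pass
-- ===== SOURCE B (Python) =====
-- def happybirthday(name_to_day, name_to_month, name_to_year):
--     day_to_names = {}
--     for name, day in name_to_day.items():
--         day_to_names.setdefault(day, []).append(name)
--     result = {}
--     for day, names in day_to_names.items():
--         best = max(names, key=lambda n: 2022 - name_to_year[n])
--         year = name_to_year[best]
--         result[day] = (best, (name_to_month[best], year, 2022 - year))
--     return result
-- ===== Notes on version B (the rewrite author's own statement) =====
-- stated objective: alternative
-- what changed: A keeps a running best-per-day record while scanning names once; B first groups names by day with setdefault/append and then, in a second pass, picks each day's winner with max(names, key=age) (first maximal element, matching A's strict-> tie rule).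
import Mathlib
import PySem

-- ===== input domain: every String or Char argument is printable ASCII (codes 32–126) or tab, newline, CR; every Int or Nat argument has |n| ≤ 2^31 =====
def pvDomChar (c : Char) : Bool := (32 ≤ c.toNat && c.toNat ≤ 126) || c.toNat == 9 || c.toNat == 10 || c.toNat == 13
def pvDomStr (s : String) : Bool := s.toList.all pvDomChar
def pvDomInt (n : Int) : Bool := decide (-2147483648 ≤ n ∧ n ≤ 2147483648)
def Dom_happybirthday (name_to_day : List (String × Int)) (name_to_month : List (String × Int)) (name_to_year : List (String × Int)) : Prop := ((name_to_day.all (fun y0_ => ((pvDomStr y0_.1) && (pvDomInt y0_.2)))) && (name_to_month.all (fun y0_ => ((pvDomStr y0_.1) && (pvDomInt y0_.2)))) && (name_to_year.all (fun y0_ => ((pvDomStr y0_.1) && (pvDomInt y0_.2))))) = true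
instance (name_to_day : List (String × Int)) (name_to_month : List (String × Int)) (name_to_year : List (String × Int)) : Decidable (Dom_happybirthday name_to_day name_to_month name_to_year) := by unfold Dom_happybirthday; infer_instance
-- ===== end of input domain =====

-- B regroups the work: one pass grouping names by day, then per day Python's max(names, key=age)
-- picks the winner (first maximal = A's strict-> tie rule); same result, alternative decomposition.


-- ===== PORT A =====
def happybirthday (name_to_day : List (String × Int)) (name_to_month : List (String × Int)) (name_to_year : List (String × Int)) : List (Int × String × (Int × Int × Int)) :=
  let dd := PySem.Dict.ofList name_to_day
  let md := PySem.Dict.ofList name_to_month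
  let yd := PySem.Dict.ofList name_to_year
  -- for name in name_to_day: (KeyError on name_to_month/name_to_year is excluded by Pre_)
  (dd.keys.foldl (fun date_to_all name =>
      let day := dd.getD name 0
      let month := md.getD name 0
      let year := yd.getD name 0
      let age := 2022 - year
      let info := (month, year, age)
      if date_to_all.contains day then
        let old_info := (date_to_all.getD day ("", (0, 0, 0))).2
        let old_age := old_info.2.2
        if age > old_age then date_to_all.insert day (name, info) else date_to_all
      else date_to_all.insert day (name, info))
    PySem.Dict.empty).items

-- ===== PORT B =====
def happybirthday_alt (name_to_day : List (String × Int)) (name_to_month : List (String × Int)) (name_to_year : List (String × Int)) : List (Int × String × (Int × Int × Int)) :=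
  let dd := PySem.Dict.ofList name_to_day
  let md := PySem.Dict.ofList name_to_month
  let yd := PySem.Dict.ofList name_to_year
  -- first pass: day_to_names.setdefault(day, []).append(name)
  let day_to_names : PySem.Dict Int (List String) :=
    dd.items.foldl (fun g p => g.modify p.2 [] (fun ns => ns ++ [p.1])) PySem.Dict.empty
  -- second pass: best = max(names, key=lambda n: 2022 - name_to_year[n])
  let result := day_to_names.items.foldl (fun r q =>
      let best := (PySem.List.max? q.2 (fun n => 2022 - yd.getD n 0)).getD ""
      let year := yd.getD best 0
      r.insert q.1 (best, (md.getD best 0, year, 2022 - year))) PySem.Dict.empty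
  result.items

-- ===== PRECONDITION & SPEC =====
-- Pre_ excludes exactly the inputs on which Python A raises KeyError: some name in
-- name_to_day is missing from name_to_month or name_to_year.
def Pre_happybirthday (name_to_day : List (String × Int)) (name_to_month : List (String × Int)) (name_to_year : List (String × Int)) : Prop :=
  ∀ p ∈ name_to_day, p.1 ∈ name_to_month.map Prod.fst ∧ p.1 ∈ name_to_year.map Prod.fst
instance (name_to_day : List (String × Int)) (name_to_month : List (String × Int)) (name_to_year : List (String × Int)) : Decidable (Pre_happybirthday name_to_day name_to_month name_to_year) := by unfold Pre_happybirthday; infer_instance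
def pvWitness_happybirthday : (List (String × Int)) × (List (String × Int)) × (List (String × Int)) :=
  ([("ann", 5), ("bob", 5)], [("ann", 3), ("bob", 7)], [("ann", 2000), ("bob", 1990)])

def Spec_happybirthday (name_to_day : List (String × Int)) (name_to_month : List (String × Int)) (name_to_year : List (String × Int)) (out : List (Int × String × (Int × Int × Int))) : Prop := out = happybirthday_alt name_to_day name_to_month name_to_year
instance (name_to_day : List (String × Int)) (name_to_month : List (String × Int)) (name_to_year : List (String × Int)) (out : List (Int × String × (Int × Int × Int))) : Decidable (Spec_happybirthday name_to_day name_to_month name_to_year out) := by unfold Spec_happybirthday; infer_instance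

-- ===== CLAIM (what is proved, stated in full; the proofs are below) =====
def Claim_equal_happybirthday : Prop := ∀ (name_to_day : List (String × Int)) (name_to_month : List (String × Int)) (name_to_year : List (String × Int)), Dom_happybirthday name_to_day name_to_month name_to_year → Pre_happybirthday name_to_day name_to_month name_to_year → Spec_happybirthday name_to_day name_to_month name_to_year (happybirthday name_to_day name_to_month name_to_year)

-- ===== LEMMAS AND PROOFS =====

-- age key, the record built for a name, and Python's first-maximal best over a group
def hbKey (yd : PySem.Dict String Int) (n : String) : Int := 2022 - yd.getD n 0

def hbVal (md yd : PySem.Dict String Int) (n : String) : String × (Int × Int × Int) :=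
  (n, (md.getD n 0, yd.getD n 0, 2022 - yd.getD n 0))

def hbBest (yd : PySem.Dict String Int) : List String → String
  | [] => ""
  | h :: t => t.foldl (fun b n => if hbKey yd b < hbKey yd n then n else b) h

def hbGrp (L : List (String × Int)) (c : Int) : List String :=
  (L.filter (fun p => p.2 == c)).map (fun p => p.1)

def hbOut (md yd : PySem.Dict String Int) (L : List (String × Int)) : List (Int × String × (Int × Int × Int)) :=
  (PySem.Set.ofList (L.map (fun p => p.2))).map (fun c => (c, hbVal md yd (hbBest yd (hbGrp L c))))

lemma hbBest_append (yd : PySem.Dict String Int) (ns : List String) (n : String) (h : ns ≠ []) :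
    hbBest yd (ns ++ [n]) = if hbKey yd (hbBest yd ns) < hbKey yd n then n else hbBest yd ns := by
  cases ns with
  | nil => exact absurd rfl h
  | cons a t => simp [hbBest, List.foldl_append]

lemma max?_cons_foldl {α κ : Type} [LinearOrder κ] (key : α → κ) (h : α) (t : List α) :
    PySem.List.max? (h :: t) key = some (t.foldl (fun b n => if key b < key n then n else b) h) := by
  have aux : ∀ (t : List α) (m : α), t.foldl (fun acc x => match acc with
        | none => some x
        | some mm => if key mm < key x then some x else some mm) (some m)
      = some (t.foldl (fun b n => if key b < key n then n else b) m) := by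
    intro t
    induction t with
    | nil => intro m; rfl
    | cons x t ih =>
      intro m
      simp only [List.foldl_cons]
      by_cases hc : key m < key x <;> simp [hc, ih]
  simp only [PySem.List.max?, List.foldl_cons]
  exact aux t h

lemma hbGrp_append (L : List (String × Int)) (p : String × Int) (c : Int) :
    hbGrp (L ++ [p]) c = hbGrp L c ++ (if p.2 = c then [p.1] else []) := by
  by_cases hc : p.2 = c <;> simp [hbGrp, List.filter_append, hc]

lemma hbGrp_ne_nil (L : List (String × Int)) (c : Int) (h : c ∈ PySem.Set.ofList (L.map (fun p => p.2))) :
    hbGrp L c ≠ [] := by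
  rw [PySem.Set.mem_ofList] at h
  simp only [List.mem_map] at h
  obtain ⟨p, hp, hpc⟩ := h
  simp only [hbGrp, ne_eq, List.map_eq_nil_iff, List.filter_eq_nil_iff]
  push Not
  exact ⟨p, hp, by simp [hpc]⟩

lemma hbGrp_nil_of_not_mem (L : List (String × Int)) (c : Int) (h : c ∉ PySem.Set.ofList (L.map (fun p => p.2))) :
    hbGrp L c = [] := by
  rw [PySem.Set.mem_ofList] at h
  simp only [List.mem_map] at h
  push Not at h
  simp only [hbGrp, List.map_eq_nil_iff, List.filter_eq_nil_iff]
  intro p hp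
  simp [h p hp]

-- A's loop, characterised
lemma a_inv (md yd : PySem.Dict String Int) (L : List (String × Int)) :
    (L.foldl (fun acc p =>
        if acc.contains p.2 then
          (if (2022 - yd.getD p.1 0) > ((acc.getD p.2 ("", (0, 0, 0))).2).2.2
           then acc.insert p.2 (hbVal md yd p.1) else acc)
        else acc.insert p.2 (hbVal md yd p.1)) PySem.Dict.empty).items
      = hbOut md yd L := by
  induction L using List.reverseRecOn with
  | nil => rfl
  | append_singleton L p ih =>
    rw [List.foldl_append, List.foldl_cons, List.foldl_nil]
    have hitems : (L.foldl (fun acc p =>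
        if acc.contains p.2 then
          (if (2022 - yd.getD p.1 0) > ((acc.getD p.2 ("", (0, 0, 0))).2).2.2
           then acc.insert p.2 (hbVal md yd p.1) else acc)
        else acc.insert p.2 (hbVal md yd p.1)) PySem.Dict.empty).items = hbOut md yd L := ih
    set D := L.foldl (fun acc p =>
        if acc.contains p.2 then
          (if (2022 - yd.getD p.1 0) > ((acc.getD p.2 ("", (0, 0, 0))).2).2.2
           then acc.insert p.2 (hbVal md yd p.1) else acc)
        else acc.insert p.2 (hbVal md yd p.1)) PySem.Dict.empty with hDdef
    have hkeys : D.keys = PySem.Set.ofList (L.map (fun p => p.2)) := by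
      simp only [PySem.Dict.keys, hitems, hbOut, List.map_map]
      exact List.map_id _
    have hnodup : D.keys.Nodup := by rw [hkeys]; exact PySem.Set.nodup_ofList _
    have hcont : D.contains p.2 = decide (p.2 ∈ PySem.Set.ofList (L.map (fun p => p.2))) := by
      rw [PySem.Dict.contains_eq_decide_mem_keys, hkeys]
    by_cases hmem : p.2 ∈ PySem.Set.ofList (L.map (fun p => p.2))
    · have hcontT : D.contains p.2 = true := by rw [hcont]; exact decide_eq_true hmem
      have hget : D.getD p.2 ("", (0, 0, 0)) = hbVal md yd (hbBest yd (hbGrp L p.2)) := by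
        refine PySem.Dict.getD_of_mem_items D ?_ hnodup _
        rw [hitems, hbOut]
        exact List.mem_map.mpr ⟨p.2, hmem, rfl⟩
      have hne : hbGrp L p.2 ≠ [] := hbGrp_ne_nil L p.2 hmem
      have hout : hbOut md yd (L ++ [p])
          = (PySem.Set.ofList (L.map (fun p => p.2))).map
              (fun c => (c, hbVal md yd (hbBest yd (hbGrp (L ++ [p]) c)))) := by
        simp only [hbOut, List.map_append, List.map_cons, List.map_nil,
          PySem.Set.ofList_append_singleton, PySem.Set.add_eq_ite, hmem, if_pos]
      rw [hout]
      simp only [hcontT, if_true, hget]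
      by_cases hlt : hbKey yd (hbBest yd (hbGrp L p.2)) < hbKey yd p.1
      · have hcondT : (2022 - yd.getD p.1 0) > ((hbVal md yd (hbBest yd (hbGrp L p.2))).2).2.2 := by
          simpa [hbVal, hbKey] using hlt
        rw [if_pos hcondT, PySem.Dict.items_insert_of_contains D _ hcontT, hitems]
        simp only [hbOut, List.map_map]
        refine List.map_congr_left ?_
        intro c hc
        by_cases hcp : c = p.2
        · subst hcp
          simp [hbGrp_append, hbBest_append yd _ _ hne, hlt]
        · have hcp' : ¬ (p.2 = c) := fun h => hcp h.symm
          simp [hbGrp_append, hcp', hcp]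
      · have hcondF : ¬ ((2022 - yd.getD p.1 0) > ((hbVal md yd (hbBest yd (hbGrp L p.2))).2).2.2) := by
          simpa [hbVal, hbKey] using hlt
        rw [if_neg hcondF, hitems]
        simp only [hbOut]
        refine List.map_congr_left ?_
        intro c hc
        by_cases hcp : c = p.2
        · subst hcp
          simp [hbGrp_append, hbBest_append yd _ _ hne, hlt]
        · have hcp' : ¬ (p.2 = c) := fun h => hcp h.symm
          simp [hbGrp_append, hcp']
    · have hcontF : D.contains p.2 = false := by rw [hcont]; exact decide_eq_false hmem
      have hnil : hbGrp L p.2 = [] := hbGrp_nil_of_not_mem L p.2 hmem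
      simp only [hcontF, Bool.false_eq_true, if_false]
      rw [PySem.Dict.items_insert_of_not_contains D _ hcontF, hitems]
      simp only [hbOut, List.map_append, List.map_cons, List.map_nil,
        PySem.Set.ofList_append_singleton, PySem.Set.add_eq_ite]
      rw [if_neg hmem, List.map_append]
      congr 1
      · refine List.map_congr_left ?_
        intro c hc
        have hcp' : ¬ (p.2 = c) := fun h => hmem (h ▸ hc)
        simp [hbGrp_append, hcp']
      · simp [hbGrp_append, hnil, hbBest]


lemma a_fold (dd md yd : PySem.Dict String Int) (hnd : dd.keys.Nodup) :
    ((dd.keys.foldl (fun date_to_all name =>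
        let day := dd.getD name 0
        let month := md.getD name 0
        let year := yd.getD name 0
        let age := 2022 - year
        let info := (month, year, age)
        if date_to_all.contains day then
          let old_info := (date_to_all.getD day ("", (0, 0, 0))).2
          let old_age := old_info.2.2
          if age > old_age then date_to_all.insert day (name, info) else date_to_all
        else date_to_all.insert day (name, info))
      PySem.Dict.empty).items) = hbOut md yd dd.items := by
  simp only [PySem.Dict.keys, List.foldl_map]
  refine congrArg PySem.Dict.items (PySem.List.foldl_congr_mem _ _ _ _ ?_) |>.trans (a_inv md yd dd.items)
  intro acc p hp
  have hday : dd.getD p.1 0 = p.2 := PySem.Dict.getD_of_mem_items dd hp hnd 0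
  simp only [hday, hbVal]

lemma a_eq (name_to_day name_to_month name_to_year : List (String × Int)) :
    happybirthday name_to_day name_to_month name_to_year
      = hbOut (PySem.Dict.ofList name_to_month) (PySem.Dict.ofList name_to_year) (PySem.Dict.ofList name_to_day).items := by
  unfold happybirthday
  exact a_fold _ _ _ (PySem.Dict.nodup_keys_ofList _)

lemma b_fold (md yd : PySem.Dict String Int) (L : List (String × Int)) :
    (((L.foldl (fun g p => g.modify p.2 [] (fun ns => ns ++ [p.1])) PySem.Dict.empty).items.foldl
        (fun r q =>
          let best := (PySem.List.max? q.2 (fun n => 2022 - yd.getD n 0)).getD ""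
          let year := yd.getD best 0
          r.insert q.1 (best, (md.getD best 0, year, 2022 - year))) PySem.Dict.empty).items)
      = hbOut md yd L := by
  have hswap : L.foldl (fun g p => g.modify p.2 [] (fun ns => ns ++ [p.1])) PySem.Dict.empty
      = (L.map (fun p => (p.2, p.1))).foldl (fun g q => g.modify q.1 [] (fun ns => ns ++ [q.2])) PySem.Dict.empty := by
    rw [List.foldl_map]
  set G := L.foldl (fun g p => g.modify p.2 [] (fun ns => ns ++ [p.1])) PySem.Dict.empty with hGdef
  have hGkeys : G.keys = PySem.Set.ofList (L.map (fun p => p.2)) := by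
    rw [hswap, PySem.Dict.keys_foldl_modify_key]
    simp [PySem.Dict.keys_empty, PySem.Set.update_nil_left, List.map_map, Function.comp_def]
  have hGnodup : G.keys.Nodup := by rw [hGkeys]; exact PySem.Set.nodup_ofList _
  have hGget : ∀ c, G.getD c [] = hbGrp L c := by
    intro c
    rw [hswap, PySem.Dict.getD_foldl_modify_append]
    simp [hbGrp, PySem.Dict.getD_empty, List.filter_map, Function.comp_def, List.map_map]
  have hGitems : G.items = (PySem.Set.ofList (L.map (fun p => p.2))).map (fun c => (c, hbGrp L c)) := by
    rw [PySem.Dict.items_eq_map_keys G hGnodup [], hGkeys]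
    exact List.map_congr_left (fun c _ => by rw [hGget c])
  rw [PySem.Dict.items_foldl_insert_fresh G.items (fun q => q.1)
      (fun q =>
        ((PySem.List.max? q.2 (fun n => 2022 - yd.getD n 0)).getD "",
          (md.getD ((PySem.List.max? q.2 (fun n => 2022 - yd.getD n 0)).getD "") 0,
            yd.getD ((PySem.List.max? q.2 (fun n => 2022 - yd.getD n 0)).getD "") 0,
            2022 - yd.getD ((PySem.List.max? q.2 (fun n => 2022 - yd.getD n 0)).getD "") 0)))
      PySem.Dict.empty (fun a _ => PySem.Dict.contains_empty _) (by exact hGnodup)]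
  rw [hGitems, List.map_map]
  unfold hbOut
  refine List.map_congr_left ?_
  intro c hc
  obtain ⟨h, t, hht⟩ := List.exists_cons_of_ne_nil (hbGrp_ne_nil L c (by simpa using hc))
  simp only [Function.comp, hht, max?_cons_foldl, Option.getD_some, hbVal, hbBest, hbKey]
  rfl

lemma b_eq (name_to_day name_to_month name_to_year : List (String × Int)) :
    happybirthday_alt name_to_day name_to_month name_to_year
      = hbOut (PySem.Dict.ofList name_to_month) (PySem.Dict.ofList name_to_year) (PySem.Dict.ofList name_to_day).items := by
  unfold happybirthday_alt
  exact b_fold _ _ _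

-- ===== VERDICT (by name: the statement is the Claim_ definition above) =====
theorem happybirthday_spec : Claim_equal_happybirthday := by
  intro d m y _ _
  unfold Spec_happybirthday
  rw [a_eq, b_eq]
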